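-- pv_equiv track=rewrite | github.com/AukeB/algorithms_from_scratch | terrain_generation/wave_function_collapse/bitmap.py | create_color_mapping
-- ===== SOURCE A (Python) =====
-- def create_color_mapping(rgb_size):
--     """ """
--     color_mapping = {}
--     current_char = "A"
--
--     for row in rgb_size:
--         for rgb in row:
--             if rgb not in color_mapping:
--                 color_mapping[rgb] = current_char
--                 # Fails when the maximum number of codepoints within Unicode has been
--                 # reached (somewhere at 1.1M), so that's fine.
--                 current_char = chr(ord(current_char) + 1)
--
--     return color_mapping
-- ===== SOURCE B (Python) =====
-- def create_color_mapping(rgb_size):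
--     """ """
--     # Phase 1: flatten; phase 2: one reverse overwrite pass leaves each color's
--     # FIRST-occurrence index (no membership test); phase 3: rank the colors by
--     # that index and assign chars by rank.
--     flat = [rgb for row in rgb_size for rgb in row]
--     first = {}
--     for i, rgb in reversed(list(enumerate(flat))):
--         first[rgb] = i
--     order = sorted(first, key=first.__getitem__)
--     return {rgb: chr(ord("A") + r) for r, rgb in enumerate(order)}
-- ===== Notes on version B (the rewrite author's own statement) =====
-- stated objective: alternative
-- what changed: A's single forward pass with a membership branch and an eagerly bumped char is replaced by a rank-based algorithm: a reverse overwrite pass records each color's first-occurrence index without any membership test, the colors are then sorted by that index, and chars are assigned by rank via chr(ord('A')+r).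
import Mathlib
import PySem

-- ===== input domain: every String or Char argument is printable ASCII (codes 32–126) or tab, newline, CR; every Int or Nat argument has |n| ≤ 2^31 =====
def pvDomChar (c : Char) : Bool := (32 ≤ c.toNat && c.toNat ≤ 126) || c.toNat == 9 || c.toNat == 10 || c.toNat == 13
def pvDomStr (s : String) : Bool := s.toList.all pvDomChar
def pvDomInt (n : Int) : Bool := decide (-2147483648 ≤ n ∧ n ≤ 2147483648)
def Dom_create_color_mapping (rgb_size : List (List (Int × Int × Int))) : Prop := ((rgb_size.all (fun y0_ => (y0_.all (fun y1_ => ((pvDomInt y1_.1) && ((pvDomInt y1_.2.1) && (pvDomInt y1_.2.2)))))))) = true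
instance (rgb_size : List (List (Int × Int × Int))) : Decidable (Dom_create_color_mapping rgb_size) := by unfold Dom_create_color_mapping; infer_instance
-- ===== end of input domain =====

-- B replaces A's forward pass with a membership branch and an eagerly bumped char by a
-- rank-based algorithm: a reverse overwrite pass records first-occurrence indices, the
-- colors are sorted by that index and chars assigned by rank (objective: alternative).

-- Python's chr(n): the one-character string at codepoint n (both Pythons call chr)
def pyChr (n : Int) : String := String.ofList [Char.ofNat n.toNat]

-- ===== PORT A =====
-- loop body of A: skip if rgb already a key, else assign chr of the current code and bump;
-- current_char is carried as its codepoint ord(current_char) ('A' = 65); chr/ord are inverse here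
def ccmStepA (st : PySem.Dict (Int × Int × Int) String × Int) (rgb : Int × Int × Int) :
    PySem.Dict (Int × Int × Int) String × Int :=
  if st.1.contains rgb then st
  else (st.1.insert rgb (pyChr st.2), st.2 + 1)

def create_color_mapping (rgb_size : List (List (Int × Int × Int))) : List (Int × Int × Int × String) :=
  let st := rgb_size.foldl (fun st row => row.foldl ccmStepA st)
    ((PySem.Dict.empty : PySem.Dict (Int × Int × Int) String), (65 : Int))
  st.1.items.map (fun p => (p.1.1, p.1.2.1, p.1.2.2, p.2))   -- flatten ((r,g,b),ch) per the type convention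

-- ===== PORT B =====
def create_color_mapping_alt (rgb_size : List (List (Int × Int × Int))) : List (Int × Int × Int × String) :=
  let flat := rgb_size.flatMap (fun row => row)
  let first := ((PySem.List.enumerate flat).reverse).foldl
      (fun d p => d.insert p.2 p.1) (PySem.Dict.empty : PySem.Dict (Int × Int × Int) Int)
  -- sorted(first, key=first.__getitem__): every key looked up is present, so __getitem__ = getD _ 0 here
  let order := PySem.List.sorted first.keys (fun k => first.getD k 0) false
  (PySem.List.enumerate order).map (fun p => (p.2.1, p.2.2.1, p.2.2.2, pyChr (65 + p.1)))

-- ===== PRECONDITION & SPEC =====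
def Spec_create_color_mapping (rgb_size : List (List (Int × Int × Int))) (out : List (Int × Int × Int × String)) : Prop := out = create_color_mapping_alt rgb_size
instance (rgb_size : List (List (Int × Int × Int))) (out : List (Int × Int × Int × String)) : Decidable (Spec_create_color_mapping rgb_size out) := by unfold Spec_create_color_mapping; infer_instance

-- ===== CLAIM (what is proved, stated in full; the proofs are below) =====
def Claim_equal_create_color_mapping : Prop := ∀ (rgb_size : List (List (Int × Int × Int))), Dom_create_color_mapping rgb_size → Spec_create_color_mapping rgb_size (create_color_mapping rgb_size)

-- ===== LEMMAS AND PROOFS =====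

-- the still-unseen first occurrences of xs, relative to a list of already-seen colors
def ccmNew (seen : List (Int × Int × Int)) : List (Int × Int × Int) → List (Int × Int × Int)
  | [] => []
  | x :: xs => if x ∈ seen then ccmNew seen xs else x :: ccmNew (x :: seen) xs

-- the colors of l tagged with chars from codepoint c on
def ccmTag (c : Int) : List (Int × Int × Int) → List ((Int × Int × Int) × String)
  | [] => []
  | x :: xs => (x, pyChr c) :: ccmTag (c + 1) xs

theorem ccmNew_congr (xs : List (Int × Int × Int)) (s t : List (Int × Int × Int))
    (h : ∀ a, a ∈ s ↔ a ∈ t) : ccmNew s xs = ccmNew t xs := by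
  induction xs generalizing s t with
  | nil => rfl
  | cons x xs ih =>
    simp only [ccmNew]
    by_cases hx : x ∈ s
    · rw [if_pos hx, if_pos ((h x).mp hx)]; exact ih s t h
    · rw [if_neg hx, if_neg (fun hc => hx ((h x).mpr hc))]
      exact congrArg (x :: ·) (ih _ _ (by intro a; simp [h a]))

theorem mem_ccmNew (xs : List (Int × Int × Int)) (seen : List (Int × Int × Int))
    (a : Int × Int × Int) (h : a ∈ ccmNew seen xs) : a ∉ seen ∧ a ∈ xs := by
  induction xs generalizing seen with
  | nil => simp [ccmNew] at h
  | cons x xs ih =>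
    simp only [ccmNew] at h
    by_cases hx : x ∈ seen
    · rw [if_pos hx] at h
      obtain ⟨h1, h2⟩ := ih seen h; exact ⟨h1, List.mem_cons_of_mem _ h2⟩
    · rw [if_neg hx] at h
      rcases List.mem_cons.mp h with h | h
      · exact ⟨h ▸ hx, h ▸ List.mem_cons_self⟩
      · obtain ⟨h1, h2⟩ := ih (x :: seen) h
        exact ⟨fun hc => h1 (List.mem_cons_of_mem _ hc), List.mem_cons_of_mem _ h2⟩

-- A's flattened loop, from any Nodup-keyed state: it appends the tagged new colors
theorem ccmFoldA_items (xs : List (Int × Int × Int))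
    (d : PySem.Dict (Int × Int × Int) String) (c : Int) (hd : d.keys.Nodup) :
    (xs.foldl ccmStepA (d, c)).1.items = d.items ++ ccmTag c (ccmNew d.keys xs) := by
  induction xs generalizing d c with
  | nil => simp [ccmNew, ccmTag]
  | cons x xs ih =>
    simp only [List.foldl, ccmNew]
    by_cases hx : x ∈ d.keys
    · rw [if_pos hx]
      have hc : d.contains x = true := (PySem.Dict.contains_iff_mem_keys d x).mpr hx
      simp only [ccmStepA, hc, if_pos]
      exact ih d c hd
    · rw [if_neg hx]
      have hc : d.contains x = false := by
        by_contra h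
        exact hx ((PySem.Dict.contains_iff_mem_keys d x).mp (by simpa using h))
      simp only [ccmStepA, hc, Bool.false_eq_true, if_false]
      have hkeys := PySem.Dict.keys_insert_of_not_contains d (pyChr c) hc
      have hnd : (d.insert x (pyChr c)).keys.Nodup := by
        rw [hkeys]; simp only [List.nodup_append, hd, List.nodup_singleton, true_and]
        intro a ha b hb
        simp only [List.mem_singleton] at hb
        exact fun he => hx ((he.trans hb) ▸ ha)
      rw [ih _ _ hnd, ccmNew_congr xs ((d.insert x (pyChr c)).keys) (x :: d.keys)
        (by intro a; rw [hkeys]; simp [or_comm]),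
        PySem.Dict.items_insert_of_not_contains d (pyChr c) hc]
      simp [ccmTag]

theorem ccmOfList_eq (xs : List (Int × Int × Int)) :
    ∀ s : List (Int × Int × Int), xs.foldl PySem.Set.add s = s ++ ccmNew s xs := by
  induction xs with
  | nil => intro s; simp [ccmNew]
  | cons x xs ih =>
    intro s
    simp only [List.foldl, ccmNew]
    by_cases hx : x ∈ s
    · rw [if_pos hx]
      have : PySem.Set.add s x = s := by simp [PySem.Set.add, PySem.Set.contains, hx]
      rw [this]; exact ih s
    · rw [if_neg hx]
      have : PySem.Set.add s x = s ++ [x] := by simp [PySem.Set.add, PySem.Set.contains, hx]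
      rw [this, ih (s ++ [x]),
        ccmNew_congr xs (s ++ [x]) (x :: s) (by intro a; simp [or_comm])]
      simp

theorem ccmDedup_eq (xs : List (Int × Int × Int)) :
    PySem.List.dedup xs = ccmNew [] xs := by
  rw [PySem.List.dedup_eq_ofList, PySem.Set.ofList_eq_foldl, ccmOfList_eq]
  simp

theorem ccmFold_nested (rows : List (List (Int × Int × Int)))
    (st : PySem.Dict (Int × Int × Int) String × Int) :
    rows.foldl (fun st row => row.foldl ccmStepA st) st
      = (rows.flatMap (fun row => row)).foldl ccmStepA st := by
  induction rows generalizing st with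
  | nil => rfl
  | cons r rows ih => simp [List.foldl_append, ih]

-- ccmTag is the enumerate-and-map that B performs
theorem ccmTag_eq_enumerate (l : List (Int × Int × Int)) :
    ∀ (c s : Int), (PySem.List.enumerate l s).map (fun p => (p.2, pyChr (c + (p.1 - s)))) = ccmTag c l := by
  induction l with
  | nil => intro c s; simp [PySem.List.enumerate_nil, ccmTag]
  | cons x xs ih =>
    intro c s
    rw [PySem.List.enumerate_cons, List.map_cons, ccmTag]
    have hfun : (fun (p : Int × (Int × Int × Int)) => (p.2, pyChr (c + (p.1 - s))))
        = (fun p => (p.2, pyChr ((c + 1) + (p.1 - (s + 1))))) := by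
      funext p; congr 1; ring_nf
    simp only [sub_self, add_zero]
    rw [hfun, ih (c + 1) (s + 1)]

-- the reverse overwrite pass: each key ends with its FIRST-occurrence index
theorem ccmFirst_get? (xs : List (Int × Int × Int)) (k : Int × Int × Int) :
    ∀ (s : Int) (d : PySem.Dict (Int × Int × Int) Int),
    (((PySem.List.enumerate xs s).reverse).foldl (fun d p => d.insert p.2 p.1) d).get? k
      = if k ∈ xs then some (s + (xs.idxOf k : Int)) else d.get? k := by
  induction xs with
  | nil => intro s d; simp [PySem.List.enumerate_nil]
  | cons x xs ih =>
    intro s d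
    rw [PySem.List.enumerate_cons, List.reverse_cons, List.foldl_append]
    simp only [List.foldl]
    by_cases hk : k = x
    · subst hk
      rw [PySem.Dict.get?_insert_self]
      simp [List.idxOf_cons_self]
    · rw [PySem.Dict.get?_insert_of_ne _ _ hk, ih (s + 1) d]
      by_cases hm : k ∈ xs
      · rw [if_pos hm, if_pos (List.mem_cons_of_mem _ hm)]
        rw [List.idxOf_cons_ne _ (fun h => hk h.symm)]
        push_cast; ring_nf
      · rw [if_neg hm, if_neg (by simp [hk, hm])]

-- first-occurrence indices are strictly increasing along the dedup order
theorem ccmNew_pairwise_idxOf (xs : List (Int × Int × Int)) :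
    ∀ seen, (ccmNew seen xs).Pairwise (fun a b => xs.idxOf a < xs.idxOf b) := by
  induction xs with
  | nil => intro seen; simp [ccmNew]
  | cons x xs ih =>
    intro seen
    simp only [ccmNew]
    by_cases hx : x ∈ seen
    · rw [if_pos hx]
      refine ((ih seen).imp_of_mem ?_)
      intro a b ha hb hlt
      have hna : a ≠ x := fun h => (mem_ccmNew xs seen a ha).1 (h ▸ hx)
      have hnb : b ≠ x := fun h => (mem_ccmNew xs seen b hb).1 (h ▸ hx)
      rw [List.idxOf_cons_ne _ (fun h => hna h.symm), List.idxOf_cons_ne _ (fun h => hnb h.symm)]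
      omega
    · rw [if_neg hx]
      refine List.Pairwise.cons ?_ (((ih (x :: seen)).imp_of_mem ?_))
      · intro b hb
        have hnb : b ≠ x := fun h =>
          (mem_ccmNew xs (x :: seen) b hb).1 (h ▸ List.mem_cons_self)
        rw [List.idxOf_cons_self, List.idxOf_cons_ne _ (fun h => hnb h.symm)]
        omega
      · intro a b ha hb hlt
        have hna : a ≠ x := fun h =>
          (mem_ccmNew xs (x :: seen) a ha).1 (h ▸ List.mem_cons_self)
        have hnb : b ≠ x := fun h =>
          (mem_ccmNew xs (x :: seen) b hb).1 (h ▸ List.mem_cons_self)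
        rw [List.idxOf_cons_ne _ (fun h => hna h.symm), List.idxOf_cons_ne _ (fun h => hnb h.symm)]
        omega

-- ===== VERDICT (by name: the statement is the Claim_ definition above) =====
theorem create_color_mapping_spec : Claim_equal_create_color_mapping := by
  intro rgb_size _
  unfold Spec_create_color_mapping create_color_mapping create_color_mapping_alt
  simp only []
  set flat := rgb_size.flatMap (fun row => row) with hflat
  set first := ((PySem.List.enumerate flat).reverse).foldl
      (fun d p => d.insert p.2 p.1) (PySem.Dict.empty : PySem.Dict (Int × Int × Int) Int) with hfirst
  set u := ccmNew [] flat with hu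
  -- A's items are the tagged dedup order
  have hA : (rgb_size.foldl (fun st row => row.foldl ccmStepA st)
      ((PySem.Dict.empty : PySem.Dict (Int × Int × Int) String), (65 : Int))).1.items
      = ccmTag 65 u := by
    rw [ccmFold_nested, ccmFoldA_items _ _ _ PySem.Dict.nodup_keys_empty,
      PySem.Dict.keys_empty]
    rfl
  -- first's lookups are the first-occurrence indices
  have hget : ∀ k ∈ flat, first.getD k 0 = (flat.idxOf k : Int) := by
    intro k hk
    rw [hfirst, PySem.Dict.getD_eq_get?_getD, ccmFirst_get? flat k 0 _, if_pos hk]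
    simp
  -- first's keys are a permutation of the dedup order
  have hkeys : first.keys.Perm u := by
    have h1 : first.keys = PySem.Set.ofList flat.reverse := by
      rw [hfirst, PySem.Dict.keys_foldl_insert_key]
      simp only [PySem.Dict.keys_empty, PySem.Set.update_nil_left]
      congr 1
      rw [List.map_reverse, PySem.List.map_snd_enumerate]
    rw [h1, hu, ← ccmDedup_eq]
    refine (List.perm_ext_iff_of_nodup (PySem.Set.nodup_ofList _) (PySem.List.nodup_dedup _)).mpr ?_
    intro a
    rw [← PySem.List.dedup_eq_ofList]
    simp
  -- dedup order is strictly increasing under first's lookup key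
  have hpw : u.Pairwise (fun a b => first.getD a 0 < first.getD b 0) := by
    refine ((ccmNew_pairwise_idxOf flat []).imp_of_mem ?_)
    intro a b ha hb hlt
    have hma : a ∈ flat := (mem_ccmNew flat [] a ha).2
    have hmb : b ∈ flat := (mem_ccmNew flat [] b hb).2
    rw [hget a hma, hget b hmb]
    exact_mod_cast hlt
  -- so B sorts first.keys back into the dedup order
  have hsort : PySem.List.sorted first.keys (fun k => first.getD k 0) false = u :=
    PySem.List.sorted_eq_of_perm_of_pairwise_lt first.keys u _ hkeys.symm hpw
  rw [hA, hsort, ← ccmTag_eq_enumerate u 65 0, List.map_map]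
  refine List.map_congr_left ?_
  intro p _
  simp
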